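-- pv_equiv track=rewrite | github.com/ReyhanArdiya/Jay-ds-algo | mine/ch-20/recognizing-patterns/sum_swap.py | sum_swap_quadratic
-- ===== SOURCE A (Python) =====
-- def sum_swap_quadratic(arr_1, arr_2):
--     """
--     time O(N * M)
--     space O(1)
--      """
--     for i in range(len(arr_1)):
--         for j in range(len(arr_2)):
--             arr_1[i], arr_2[j] = arr_2[j], arr_1[i]
--
--             if sum(arr_1) == sum(arr_2):
--                 arr_1[i], arr_2[j] = arr_2[j], arr_1[i]
--                 return [i, j]
--
--             arr_1[i], arr_2[j] = arr_2[j], arr_1[i]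
-- ===== SOURCE B (Python) =====
-- def sum_swap_quadratic(arr_1, arr_2):
--     s1 = sum(arr_1)
--     s2 = sum(arr_2)
--     d = s1 - s2
--     if d % 2 != 0:
--         return None
--     target = d // 2
--     first = {}
--     for j, v in enumerate(arr_2):
--         first.setdefault(v, j)
--     for i, a in enumerate(arr_1):
--         j = first.get(a - target)
--         if j is not None:
--             return [i, j]
--     return None
-- ===== Notes on version B (the rewrite author's own statement) =====
-- stated objective: faster
-- what changed: Replaces the nested swap-and-resum search with computing both sums once, deriving target=(s1-s2)/2, and scanning arr_1 against a first-occurrence-index dictionary of arr_2 values.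
import Mathlib
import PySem

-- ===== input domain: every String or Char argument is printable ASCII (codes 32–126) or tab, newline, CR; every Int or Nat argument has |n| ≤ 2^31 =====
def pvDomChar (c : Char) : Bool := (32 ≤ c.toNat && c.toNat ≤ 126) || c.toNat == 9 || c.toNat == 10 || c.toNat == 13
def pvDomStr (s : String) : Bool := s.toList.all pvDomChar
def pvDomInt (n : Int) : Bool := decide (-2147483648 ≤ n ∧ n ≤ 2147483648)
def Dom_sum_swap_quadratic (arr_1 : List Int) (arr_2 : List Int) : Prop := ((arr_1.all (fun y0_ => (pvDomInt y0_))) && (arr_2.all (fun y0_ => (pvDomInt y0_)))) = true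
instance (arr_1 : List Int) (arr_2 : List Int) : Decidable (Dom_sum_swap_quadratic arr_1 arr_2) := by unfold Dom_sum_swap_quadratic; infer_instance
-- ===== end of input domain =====

-- B replaces A's O(N*M*(N+M)) swap-and-resum search by computing the sums once and scanning with a
-- first-index dictionary of arr_2 (O(N+M)); return values are identical (A's in-place swaps cancel out).

-- ===== PORT A =====
-- inner loop 'for j in range(len(arr_2))': swap, compare sums, restore (the swap/restore pair is
-- modelled by comparing the sums of the two set-updated lists; the arrays are restored before return)
def pvLoopJ (arr_1 arr_2 : List Int) (i j : Nat) : Option (List Int) :=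
  if _h : j < arr_2.length then
    if (arr_1.set i (arr_2.getD j 0)).sum = (arr_2.set j (arr_1.getD i 0)).sum then
      some [(i : Int), (j : Int)]
    else pvLoopJ arr_1 arr_2 i (j + 1)
  else none
termination_by arr_2.length - j

-- outer loop 'for i in range(len(arr_1))'
def pvLoopI (arr_1 arr_2 : List Int) (i : Nat) : Option (List Int) :=
  if _h : i < arr_1.length then
    match pvLoopJ arr_1 arr_2 i 0 with
    | some r => some r
    | none => pvLoopI arr_1 arr_2 (i + 1)
  else none
termination_by arr_1.length - i

def sum_swap_quadratic (arr_1 : List Int) (arr_2 : List Int) : Option (List Int) :=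
  pvLoopI arr_1 arr_2 0

-- ===== PORT B =====
-- 'for i, a in enumerate(arr_1): j = first.get(a - target); if j is not None: return [i, j]'
def pvScan (first : PySem.Dict Int Int) (target : Int) : List (Int × Int) → Option (List Int)
  | [] => none
  | (i, a) :: rest =>
    match first.get? (a - target) with
    | some j => some [i, j]
    | none => pvScan first target rest

def sum_swap_quadratic_alt (arr_1 : List Int) (arr_2 : List Int) : Option (List Int) :=
  let s1 := arr_1.sum
  let s2 := arr_2.sum
  let d := s1 - s2
  if PySem.Int.mod d 2 ≠ 0 then none
  else
    let target := PySem.Int.floordiv d 2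
    let first := (PySem.List.enumerate arr_2 0).foldl (fun f p => f.setdefault p.2 p.1) PySem.Dict.empty
    pvScan first target (PySem.List.enumerate arr_1 0)

-- ===== PRECONDITION & SPEC =====
def Spec_sum_swap_quadratic (arr_1 : List Int) (arr_2 : List Int) (out : Option (List Int)) : Prop := out = sum_swap_quadratic_alt arr_1 arr_2
instance (arr_1 : List Int) (arr_2 : List Int) (out : Option (List Int)) : Decidable (Spec_sum_swap_quadratic arr_1 arr_2 out) := by unfold Spec_sum_swap_quadratic; infer_instance

-- ===== CLAIM (what is proved, stated in full; the proofs are below) =====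
def Claim_equal_sum_swap_quadratic : Prop := ∀ (arr_1 : List Int) (arr_2 : List Int), Dom_sum_swap_quadratic arr_1 arr_2 → Spec_sum_swap_quadratic arr_1 arr_2 (sum_swap_quadratic arr_1 arr_2)

-- ===== LEMMAS AND PROOFS =====

-- sum of a list after an in-bounds point update
theorem pv_sum_set (xs : List Int) (i : Nat) (v : Int) (h : i < xs.length) :
    (xs.set i v).sum = xs.sum - xs.getD i 0 + v := by
  induction xs generalizing i with
  | nil => simp at h
  | cons x xs ih =>
    cases i with
    | zero => simp [List.getD]; ring
    | succ n =>
      simp [List.getD] at h ⊢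
      rw [show (xs[n]?.getD 0) = xs.getD n 0 from rfl, ih n (by omega)]; ring

-- the swap-makes-sums-equal test is exactly 'arr_2[j] = arr_1[i] - t' when arr_1.sum - arr_2.sum = 2*t
theorem pv_cond_iff (arr_1 arr_2 : List Int) (i j : Nat) (t : Int)
    (hi : i < arr_1.length) (hj : j < arr_2.length)
    (ht : arr_1.sum - arr_2.sum = 2 * t) :
    ((arr_1.set i (arr_2.getD j 0)).sum = (arr_2.set j (arr_1.getD i 0)).sum)
      ↔ arr_2.getD j 0 = arr_1.getD i 0 - t := by
  rw [pv_sum_set _ _ _ hi, pv_sum_set _ _ _ hj]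
  omega

-- B's dictionary: first occurrence index of each value of the enumerated list
theorem pv_dict_get (l : List Int) (s : Int) (d : PySem.Dict Int Int) (v : Int) :
    ((PySem.List.enumerate l s).foldl (fun f p => f.setdefault p.2 p.1) d).get? v
      = ((d.get? v).or ((PySem.List.index? l v).map (fun k => s + (k : Int)))) := by
  induction l generalizing s d with
  | nil => simp [PySem.List.enumerate_nil, PySem.List.index?_eq_idxOf?]
  | cons x xs ih =>
    rw [PySem.List.enumerate_cons]
    simp only [List.foldl_cons]
    rw [ih]
    by_cases hxv : x = v
    · subst hxv
      rw [PySem.List.index?_cons_self]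
      cases hg : d.get? x with
      | some w =>
        have hc : d.contains x = true := by
          rw [PySem.Dict.contains_eq_isSome_get?, hg]; rfl
        have hsd : d.setdefault x s = d := by
          simp only [PySem.Dict.setdefault, hc, if_true]
        rw [hsd, hg]; rfl
      | none =>
        have hc : ¬ (d.contains x = true) := by
          rw [PySem.Dict.contains_eq_isSome_get?, hg]; simp
        have hsd : d.setdefault x s = d.insert x s := by
          simp only [PySem.Dict.setdefault, PySem.Dict.insert, if_neg hc]
        rw [hsd, PySem.Dict.get?_insert_self]
        simp
    · rw [PySem.List.index?_cons_of_ne xs hxv]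
      have hset : (d.setdefault x s).get? v = d.get? v := by
        by_cases hc : d.contains x = true
        · simp only [PySem.Dict.setdefault, if_pos hc]
        · have hsd : d.setdefault x s = d.insert x s := by
            simp only [PySem.Dict.setdefault, PySem.Dict.insert, if_neg hc]
          rw [hsd]
          exact PySem.Dict.get?_insert_of_ne d s (Ne.symm hxv)
      rw [hset]
      cases PySem.List.index? xs v with
      | none => rfl
      | some k =>
        have hk : s + 1 + (k : Int) = s + ((k + 1 : Nat) : Int) := by push_cast; ring
        simp [hk]

-- the inner loop of A finds the first j ≥ current with arr_2[j] = arr_1[i] - t (even-difference case)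
theorem pv_loopJ_eq (arr_1 arr_2 : List Int) (i j : Nat) (t : Int)
    (hi : i < arr_1.length) (ht : arr_1.sum - arr_2.sum = 2 * t) :
    pvLoopJ arr_1 arr_2 i j
      = (PySem.List.index? (arr_2.drop j) (arr_1.getD i 0 - t)).map
          (fun k => [(i : Int), ((j + k : Nat) : Int)]) := by
  by_cases hj : j < arr_2.length
  · rw [pvLoopJ]
    have hdrop : arr_2.drop j = arr_2[j] :: arr_2.drop (j + 1) :=
      List.drop_eq_getElem_cons hj
    rw [hdrop]
    have hgd : arr_2.getD j 0 = arr_2[j] := List.getD_eq_getElem arr_2 0 hj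
    by_cases hcond : arr_2.getD j 0 = arr_1.getD i 0 - t
    · rw [dif_pos hj, if_pos ((pv_cond_iff arr_1 arr_2 i j t hi hj ht).mpr hcond)]
      rw [← hgd, hcond, PySem.List.index?_cons_self]
      simp
    · rw [dif_pos hj, if_neg (fun h => hcond ((pv_cond_iff arr_1 arr_2 i j t hi hj ht).mp h))]
      rw [pv_loopJ_eq arr_1 arr_2 i (j + 1) t hi ht]
      rw [PySem.List.index?_cons_of_ne (arr_2.drop (j + 1)) (by rw [← hgd]; exact hcond)]
      cases PySem.List.index? (arr_2.drop (j + 1)) (arr_1.getD i 0 - t) with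
      | none => rfl
      | some k =>
        simp
        omega
  · rw [pvLoopJ, dif_neg hj]
    rw [List.drop_of_length_le (by omega)]
    simp [PySem.List.index?_eq_idxOf?]
termination_by arr_2.length - j

-- when the difference of sums is odd, no single swap can equalize them: A's inner loop never fires
theorem pv_loopJ_none (arr_1 arr_2 : List Int) (i j : Nat)
    (hi : i < arr_1.length) (hodd : ¬ (2 ∣ (arr_1.sum - arr_2.sum))) :
    pvLoopJ arr_1 arr_2 i j = none := by
  by_cases hj : j < arr_2.length
  · rw [pvLoopJ, dif_pos hj]
    have : ¬ ((arr_1.set i (arr_2.getD j 0)).sum = (arr_2.set j (arr_1.getD i 0)).sum) := by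
      rw [pv_sum_set _ _ _ hi, pv_sum_set _ _ _ hj]
      intro h
      exact hodd ⟨arr_1.getD i 0 - arr_2.getD j 0, by omega⟩
    rw [if_neg this]
    exact pv_loopJ_none arr_1 arr_2 i (j + 1) hi hodd
  · rw [pvLoopJ, dif_neg hj]
termination_by arr_2.length - j

theorem pv_loopI_none (arr_1 arr_2 : List Int) (i : Nat)
    (hodd : ¬ (2 ∣ (arr_1.sum - arr_2.sum))) :
    pvLoopI arr_1 arr_2 i = none := by
  by_cases hiL : i < arr_1.length
  · rw [pvLoopI, dif_pos hiL, pv_loopJ_none arr_1 arr_2 i 0 hiL hodd]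
    exact pv_loopI_none arr_1 arr_2 (i + 1) hodd
  · rw [pvLoopI, dif_neg hiL]
termination_by arr_1.length - i

-- outer loops agree step by step (even-difference case)
theorem pv_loopI_eq_scan (arr_1 arr_2 : List Int) (i : Nat) (t : Int)
    (ht : arr_1.sum - arr_2.sum = 2 * t) :
    pvLoopI arr_1 arr_2 i
      = pvScan ((PySem.List.enumerate arr_2 0).foldl (fun f p => f.setdefault p.2 p.1) PySem.Dict.empty)
          t (PySem.List.enumerate (arr_1.drop i) (i : Int)) := by
  by_cases hiL : i < arr_1.length
  · have hdrop : arr_1.drop i = arr_1[i] :: arr_1.drop (i + 1) :=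
      List.drop_eq_getElem_cons hiL
    rw [hdrop, PySem.List.enumerate_cons]
    rw [pvLoopI, dif_pos hiL]
    rw [pv_loopJ_eq arr_1 arr_2 i 0 t hiL ht]
    simp only [pvScan]
    rw [pv_dict_get, PySem.Dict.get?_empty, Option.none_or]
    have hgd : arr_1.getD i 0 = arr_1[i] := List.getD_eq_getElem arr_1 0 hiL
    rw [← hgd, List.drop_zero]
    cases hix : PySem.List.index? arr_2 (arr_1.getD i 0 - t) with
    | some k => simp
    | none =>
      simp only [Option.map_none]
      rw [pv_loopI_eq_scan arr_1 arr_2 (i + 1) t ht]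
      norm_num
  · rw [pvLoopI, dif_neg hiL, List.drop_of_length_le (by omega),
        PySem.List.enumerate_nil]
    rfl
termination_by arr_1.length - i

-- ===== VERDICT (by name: the statement is the Claim_ definition above) =====
theorem sum_swap_quadratic_spec : Claim_equal_sum_swap_quadratic := by
  intro arr_1 arr_2 _
  unfold Spec_sum_swap_quadratic sum_swap_quadratic sum_swap_quadratic_alt
  simp only []
  by_cases hm : PySem.Int.mod (arr_1.sum - arr_2.sum) 2 = 0
  · rw [if_neg (by simpa using hm)]
    have ht : arr_1.sum - arr_2.sum = 2 * PySem.Int.floordiv (arr_1.sum - arr_2.sum) 2 := by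
      have := PySem.Int.floordiv_mul_add_mod (arr_1.sum - arr_2.sum) 2
      omega
    rw [pv_loopI_eq_scan arr_1 arr_2 0 _ ht]
    norm_num
  · rw [if_pos (by simpa using hm)]
    have hodd : ¬ (2 ∣ (arr_1.sum - arr_2.sum)) := by
      rw [← PySem.Int.mod_eq_zero_iff_dvd]; exact hm
    exact pv_loopI_none arr_1 arr_2 0 hodd
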